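-- pv_equiv track=rewrite | github.com/sjpkorea/xython.github.io | xython/youtil.py | change_two_list2d_to_one_list2d_with_samelen
-- ===== SOURCE A (Python) =====
-- def change_two_list2d_to_one_list2d_with_samelen(input_list2d_1, input_list2d_2):
-- 	"""
-- 	선택한 영역이 2개를 서로 같은것을 기준으로 묶을려고하는것이다
-- 	제일앞의 한줄이 같은것이다
-- 	만약 묶을려고 할때 자료가 없을때는 그 기준자료만큼 빈자료를 넣어서 다음자료를 추가하는 것이다
--
-- 	:param input_list2d_1:
-- 	:param input_list2d_2:
-- 	:return:
-- 	"""
-- 	no_of_list2d_1 = len(input_list2d_1[0]) - 1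
-- 	no_of_list2d_2 = len(input_list2d_2[0]) - 1
-- 	empty_list2d_1 = [""] * no_of_list2d_1
-- 	empty_list2d_2 = [""] * no_of_list2d_2
-- 	# 리스트형태로는 코드가 더 길어질것으로 보여서 입력자료를 사전으로 변경 한것
-- 	temp_dic = {}
-- 	for one in input_list2d_1:
-- 		temp_dic[one[0]] = one[1:]
-- 	checked_list = []
-- 	# 기준이 되는 자료에 항목이 있을때
-- 	for one in input_list2d_2:
-- 		if one[0] in temp_dic.keys():
-- 			temp_dic[one[0]] = list(temp_dic[one[0]]) + list(one[1:])
-- 		else: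
-- 			temp_dic[one[0]] = empty_list2d_1 + list(one[1:])
-- 		checked_list.append(one[0])
-- 	# 기준자료에 항목이 없는것에 대한것
-- 	for one in temp_dic.keys():
-- 		if not one in checked_list:
-- 			temp_dic[one] = list(temp_dic[one]) + empty_list2d_2
-- 	# 사전형식을 리스트로 다시 만드는것
-- 	result = []
-- 	for one in temp_dic:
-- 		result.append([one] + list(temp_dic[one]))
-- 	return result
-- ===== SOURCE B (Python) =====
-- def change_two_list2d_to_one_list2d_with_samelen(input_list2d_1, input_list2d_2):
-- 	empty_1 = [""] * (len(input_list2d_1[0]) - 1)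
-- 	empty_2 = [""] * (len(input_list2d_2[0]) - 1)
-- 	dict_1 = {}
-- 	for row in input_list2d_1:
-- 		dict_1[row[0]] = row[1:]
-- 	dict_2 = {}
-- 	for row in input_list2d_2:
-- 		dict_2.setdefault(row[0], []).extend(row[1:])
-- 	result = []
-- 	for key, vals in dict_1.items():
-- 		result.append([key] + vals + dict_2.get(key, empty_2))
-- 	for key, vals in dict_2.items():
-- 		if key not in dict_1:
-- 			result.append([key] + empty_1 + vals)
-- 	return result
-- ===== Notes on version B (the rewrite author's own statement) =====
-- stated objective: simpler
-- what changed: B builds two dictionaries up front (dict_1 last-wins from list 1, dict_2 accumulating duplicate keys from list 2) and emits the merged rows in a single forward pass, instead of A's mutate-one-dict-in-place flow with a checked_list and a separate padding loop over the keys.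
-- outside the precondition, e.g. on change_two_list2d_to_one_list2d_with_samelen([], [['a', 'x']]): A raises IndexError, B raises IndexError; on change_two_list2d_to_one_list2d_with_samelen([['a', '1'], []], [['a', 'x']]): A raises IndexError, B raises IndexError
import Mathlib
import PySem

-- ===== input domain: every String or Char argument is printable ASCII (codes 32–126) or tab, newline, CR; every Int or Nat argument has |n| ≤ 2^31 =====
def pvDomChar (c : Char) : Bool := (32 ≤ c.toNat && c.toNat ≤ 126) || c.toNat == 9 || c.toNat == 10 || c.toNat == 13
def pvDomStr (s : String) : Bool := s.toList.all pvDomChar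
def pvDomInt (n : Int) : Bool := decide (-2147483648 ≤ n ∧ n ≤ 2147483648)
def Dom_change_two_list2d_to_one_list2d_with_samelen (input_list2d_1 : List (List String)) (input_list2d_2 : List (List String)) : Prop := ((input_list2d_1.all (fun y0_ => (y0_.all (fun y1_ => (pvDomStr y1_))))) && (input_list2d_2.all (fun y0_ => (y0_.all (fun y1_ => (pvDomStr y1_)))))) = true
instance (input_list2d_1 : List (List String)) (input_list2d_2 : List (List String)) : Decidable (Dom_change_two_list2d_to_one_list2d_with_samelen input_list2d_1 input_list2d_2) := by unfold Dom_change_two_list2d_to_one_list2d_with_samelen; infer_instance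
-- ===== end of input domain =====

-- B merges the two tables via two dictionaries built up front (dict1: last row wins; dict2: duplicate keys
-- concatenate) and emits the result in a single forward pass, replacing A's mutate-then-pad dictionary flow
-- (objective: simpler decomposition, same asymptotic cost).

-- ===== PORT A =====
-- `[""] * (len(l[0]) - 1)`
def pvAEmpty (l : List (List String)) : List String :=
  List.replicate ((l.headD []).length - 1) ""

-- `for one in input_list2d_1: temp_dic[one[0]] = one[1:]`  (rows are nonempty under Pre_; an empty row, on
-- which Python raises IndexError, is skipped)
def pvADict (l1 : List (List String)) : PySem.Dict String (List String) :=
  l1.foldl (fun d one => match one with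
    | [] => d
    | k :: rest => d.insert k rest) PySem.Dict.empty

-- the second loop: state = (temp_dic, checked_list)
def pvALoop2 (empty1 : List String) (l2 : List (List String))
    (d : PySem.Dict String (List String)) : PySem.Dict String (List String) × List String :=
  l2.foldl (fun p one => match one with
    | [] => p
    | k :: rest =>
      if p.1.contains k then (p.1.insert k (p.1.getD k [] ++ rest), p.2 ++ [k])
      else (p.1.insert k (empty1 ++ rest), p.2 ++ [k])) (d, [])

-- `for one in temp_dic.keys(): if not one in checked_list: temp_dic[one] = ... + empty_list2d_2`
def pvALoop3 (empty2 : List String) (checked : List String) (ks : List String)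
    (d : PySem.Dict String (List String)) : PySem.Dict String (List String) :=
  ks.foldl (fun d k => if checked.contains k then d else d.insert k (d.getD k [] ++ empty2)) d

def change_two_list2d_to_one_list2d_with_samelen (input_list2d_1 : List (List String)) (input_list2d_2 : List (List String)) : List (List String) :=
  let empty_list2d_1 := pvAEmpty input_list2d_1
  let empty_list2d_2 := pvAEmpty input_list2d_2
  let temp_dic := pvADict input_list2d_1
  let dc := pvALoop2 empty_list2d_1 input_list2d_2 temp_dic
  let temp_dic2 := pvALoop3 empty_list2d_2 dc.2 dc.1.keys dc.1
  temp_dic2.items.foldl (fun res p => res ++ [p.1 :: p.2]) []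

-- ===== PORT B =====
-- `dict_1[row[0]] = row[1:]`  (empty rows — outside Pre_ — are skipped)
def pvBDict1 (l1 : List (List String)) : PySem.Dict String (List String) :=
  l1.foldl (fun d row => match row with
    | [] => d
    | k :: rest => d.insert k rest) PySem.Dict.empty

-- `dict_2.setdefault(row[0], []).extend(row[1:])`
def pvBDict2 (l2 : List (List String)) : PySem.Dict String (List String) :=
  l2.foldl (fun d row => match row with
    | [] => d
    | k :: rest => d.modify k [] (fun v => v ++ rest)) PySem.Dict.empty

def change_two_list2d_to_one_list2d_with_samelen_alt (input_list2d_1 : List (List String)) (input_list2d_2 : List (List String)) : List (List String) :=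
  let empty_1 := List.replicate ((input_list2d_1.headD []).length - 1) ""
  let empty_2 := List.replicate ((input_list2d_2.headD []).length - 1) ""
  let dict_1 := pvBDict1 input_list2d_1
  let dict_2 := pvBDict2 input_list2d_2
  let result := dict_1.items.foldl (fun res p =>
    res ++ [p.1 :: (p.2 ++ (match dict_2.get? p.1 with
      | some v => v
      | none => empty_2))]) []
  dict_2.items.foldl (fun res p =>
    if dict_1.contains p.1 then res else res ++ [p.1 :: (empty_1 ++ p.2)]) result

-- ===== PRECONDITION & SPEC =====
-- Pre_ excludes exactly the inputs on which the Python A raises IndexError: an empty outer list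
-- (input_list2d_X[0]) or an empty row (one[0]).
def Pre_change_two_list2d_to_one_list2d_with_samelen (input_list2d_1 : List (List String)) (input_list2d_2 : List (List String)) : Prop :=
  input_list2d_1 ≠ [] ∧ input_list2d_2 ≠ [] ∧ (∀ r ∈ input_list2d_1, r ≠ []) ∧ (∀ r ∈ input_list2d_2, r ≠ [])
instance (input_list2d_1 : List (List String)) (input_list2d_2 : List (List String)) : Decidable (Pre_change_two_list2d_to_one_list2d_with_samelen input_list2d_1 input_list2d_2) := by unfold Pre_change_two_list2d_to_one_list2d_with_samelen; infer_instance

def pvWitness_change_two_list2d_to_one_list2d_with_samelen : List (List String) × List (List String) :=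
  ([["a", "1"], ["b", "2"]], [["a", "x"], ["c", "y"]])

def Spec_change_two_list2d_to_one_list2d_with_samelen (input_list2d_1 : List (List String)) (input_list2d_2 : List (List String)) (out : List (List String)) : Prop := out = change_two_list2d_to_one_list2d_with_samelen_alt input_list2d_1 input_list2d_2
instance (input_list2d_1 : List (List String)) (input_list2d_2 : List (List String)) (out : List (List String)) : Decidable (Spec_change_two_list2d_to_one_list2d_with_samelen input_list2d_1 input_list2d_2 out) := by unfold Spec_change_two_list2d_to_one_list2d_with_samelen; infer_instance

-- ===== CLAIM (what is proved, stated in full; the proofs are below) =====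
def Claim_equal_change_two_list2d_to_one_list2d_with_samelen : Prop := ∀ (input_list2d_1 : List (List String)) (input_list2d_2 : List (List String)), Dom_change_two_list2d_to_one_list2d_with_samelen input_list2d_1 input_list2d_2 → Pre_change_two_list2d_to_one_list2d_with_samelen input_list2d_1 input_list2d_2 → Spec_change_two_list2d_to_one_list2d_with_samelen input_list2d_1 input_list2d_2 (change_two_list2d_to_one_list2d_with_samelen input_list2d_1 input_list2d_2)

-- ===== LEMMAS AND PROOFS =====

-- the nonempty rows of a table, as (key, values) pairs
def pvRows (l : List (List String)) : List (String × List String) :=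
  l.filterMap (fun r => match r with | [] => none | k :: rest => some (k, rest))

-- all values of rows of `r` keyed `c`, concatenated in order
def pvGrp (r : List (String × List String)) (c : String) : List String :=
  (r.filter (fun p => p.1 == c)).flatMap (fun p => p.2)

lemma pv_beq_comm (a b : String) : (a == b) = (b == a) := by
  rw [Bool.eq_iff_iff, beq_iff_eq, beq_iff_eq]; exact eq_comm

lemma pvADict_rows (l1 : List (List String)) (d : PySem.Dict String (List String)) :
    l1.foldl (fun d one => match one with
      | [] => d
      | k :: rest => d.insert k rest) d
    = (pvRows l1).foldl (fun d p => d.insert p.1 p.2) d := by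
  induction l1 generalizing d with
  | nil => rfl
  | cons r t ih => cases r <;> simp [pvRows, ih]

lemma pvBDict2_rows (l2 : List (List String)) (d : PySem.Dict String (List String)) :
    l2.foldl (fun d row => match row with
      | [] => d
      | k :: rest => d.modify k [] (fun v => v ++ rest)) d
    = (pvRows l2).foldl (fun d p => d.modify p.1 [] (fun v => v ++ p.2)) d := by
  induction l2 generalizing d with
  | nil => rfl
  | cons r t ih => cases r <;> simp [pvRows, ih]

lemma pvALoop2_rows (empty1 : List String) (l2 : List (List String))
    (s : PySem.Dict String (List String) × List String) :
    l2.foldl (fun p one => match one with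
      | [] => p
      | k :: rest =>
        if p.1.contains k then (p.1.insert k (p.1.getD k [] ++ rest), p.2 ++ [k])
        else (p.1.insert k (empty1 ++ rest), p.2 ++ [k])) s
    = (pvRows l2).foldl (fun p q =>
        if p.1.contains q.1 then (p.1.insert q.1 (p.1.getD q.1 [] ++ q.2), p.2 ++ [q.1])
        else (p.1.insert q.1 (empty1 ++ q.2), p.2 ++ [q.1])) s := by
  induction l2 generalizing s with
  | nil => rfl
  | cons r t ih => cases r <;> simp [pvRows, ih]

lemma pv_foldl_add (xs s : List String) :
    xs.foldl PySem.Set.add s = s ++ (PySem.Set.ofList xs).filter (fun y => !s.contains y) := by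
  induction xs generalizing s with
  | nil => simp [PySem.Set.ofList, PySem.Set.empty]
  | cons x t ih =>
    have hofl : PySem.Set.ofList (x :: t) = t.foldl PySem.Set.add [x] := by
      simp [PySem.Set.ofList, PySem.Set.empty, List.foldl_cons, PySem.Set.add,
        PySem.Set.contains]
    rw [List.foldl_cons, ih (PySem.Set.add s x), hofl, ih [x]]
    by_cases h : s.contains x = true
    · have hadd : PySem.Set.add s x = s := by
        rw [PySem.Set.add, PySem.Set.contains, if_pos h]
      rw [hadd]
      have hx : (!s.contains x) = false := by simp only [h, Bool.not_true]
      rw [List.filter_append, List.filter_cons, hx]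
      simp only [Bool.false_eq_true, if_false, List.filter_nil, List.nil_append,
        List.filter_filter]
      congr 1
      apply List.filter_congr
      intro y _
      have hxs : x ∈ s := by
        have := h; simpa [List.contains_iff_exists_mem_beq, beq_iff_eq] using this
      by_cases hy : y ∈ s
      · simp [hy]
      · have hy' : s.contains y = false := by simpa using hy
        have hne : y ≠ x := fun he => hy (he ▸ hxs)
        simp [hne]
    · have h' : s.contains x = false := Bool.of_not_eq_true h
      have hadd : PySem.Set.add s x = s ++ [x] := by
        rw [PySem.Set.add, PySem.Set.contains, if_neg h]
      rw [hadd]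
      have hx : (!s.contains x) = true := by simp only [h', Bool.not_false]
      rw [List.filter_append, List.filter_cons, hx]
      simp only [if_true, List.filter_nil, List.filter_filter, List.append_assoc]
      congr 2
      apply List.filter_congr
      intro y _
      rw [List.contains_append]
      cases hs : s.contains y <;> cases hx1 : ([x].contains y) <;> simp

lemma pv_ofList_cons (x : String) (xs : List String) :
    PySem.Set.ofList (x :: xs) = x :: (PySem.Set.ofList xs).filter (fun y => !(y == x)) := by
  have h1 : PySem.Set.ofList (x :: xs) = xs.foldl PySem.Set.add [x] := by
    simp [PySem.Set.ofList, PySem.Set.empty, List.foldl_cons, PySem.Set.add, PySem.Set.contains]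
  rw [h1, pv_foldl_add, List.singleton_append]
  congr 1
  apply List.filter_congr
  intro y _
  by_cases he : y = x
  · simp [he]
  · simp [he]

lemma pvGrp_cons (k : String) (vs : List String) (r : List (String × List String)) (c : String) :
    pvGrp ((k, vs) :: r) c = if k == c then vs ++ pvGrp r c else pvGrp r c := by
  by_cases h : (k == c) = true <;> simp_all [pvGrp]

lemma pvGrp_eq_nil (r : List (String × List String)) (c : String)
    (h : c ∉ r.map (fun p => p.1)) : pvGrp r c = [] := by
  have : r.filter (fun p => p.1 == c) = [] := by
    apply List.filter_eq_nil_iff.mpr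
    intro p hp hbeq
    exact h (List.mem_map.mpr ⟨p, hp, eq_of_beq hbeq⟩)
  simp [pvGrp, this]

lemma pv_merge_items (pad : List String) (r : List (String × List String))
    (d : PySem.Dict String (List String)) (hnd : d.keys.Nodup) :
    (r.foldl (fun d p =>
        if d.contains p.1 then d.insert p.1 (d.getD p.1 [] ++ p.2)
        else d.insert p.1 (pad ++ p.2)) d).items
    = d.items.map (fun q => (q.1, q.2 ++ pvGrp r q.1))
      ++ ((PySem.Set.ofList (r.map (fun p => p.1))).filter (fun k => !d.contains k)).map
          (fun k => (k, pad ++ pvGrp r k)) := by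
  induction r generalizing d with
  | nil =>
    simp [pvGrp, PySem.Set.ofList, PySem.Set.empty]
  | cons p r ih =>
    obtain ⟨k, vs⟩ := p
    rw [List.foldl_cons]
    by_cases hc : d.contains k = true
    · have hstep : (if d.contains k then d.insert k (d.getD k [] ++ vs)
          else d.insert k (pad ++ vs)) = d.insert k (d.getD k [] ++ vs) := by
        rw [if_pos hc]
      simp only [hstep]
      rw [ih _ (PySem.Dict.nodup_keys_insert d k _ hnd)]
      congr 1
      · -- first part
        rw [PySem.Dict.items_insert_of_contains d _ hc, List.map_map]
        apply List.map_congr_left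
        intro q hq
        by_cases hqk : (q.1 == k) = true
        · have hq1 : q.1 = k := eq_of_beq hqk
          have hval : d.getD k [] = q.2 := by
            have : (q.1, q.2) ∈ d.items := by simpa using hq
            rw [← hq1]
            exact PySem.Dict.getD_of_mem_items d this hnd []
          simp only [Function.comp_apply, pvGrp_cons, hq1, hval]
          simp [List.append_assoc]
        · have hq1 : q.1 ≠ k := fun he => hqk (by simp [he])
          simp only [Function.comp_apply, if_neg hqk, pvGrp_cons]
          have hkq : (k == q.1) = false := by simp [Ne.symm hq1]
          simp [hkq]
      · -- second part
        rw [List.map_cons, pv_ofList_cons, List.filter_cons]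
        have hck : (!d.contains k) = false := by simp [hc]
        simp only [hck, Bool.false_eq_true, if_false, List.filter_filter]
        have hfilter : ((PySem.Set.ofList (r.map (fun p => p.1))).filter
              (fun y => !(d.insert k (d.getD k [] ++ vs)).contains y))
            = ((PySem.Set.ofList (r.map (fun p => p.1))).filter
              (fun a => (!d.contains a && !(a == k)))) := by
          apply List.filter_congr
          intro y _
          rw [PySem.Dict.contains_insert]
          simp [Bool.not_or, Bool.and_comm]
        rw [hfilter]
        apply List.map_congr_left
        intro y hy
        have hyk : (y == k) = false := by
          have := (List.mem_filter.mp hy).2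
          cases h1 : (y == k) <;> simp_all
        have hky : (k == y) = false := by rw [pv_beq_comm]; exact hyk
        rw [pvGrp_cons]
        simp [hky]
    · have hc' : d.contains k = false := Bool.of_not_eq_true hc
      have hstep : (if d.contains k then d.insert k (d.getD k [] ++ vs)
          else d.insert k (pad ++ vs)) = d.insert k (pad ++ vs) := by
        rw [if_neg hc]
      simp only [hstep]
      rw [ih _ (PySem.Dict.nodup_keys_insert d k _ hnd)]
      rw [PySem.Dict.items_insert_of_not_contains d _ hc']
      simp only [List.map_append, List.map_cons, List.map_nil]
      rw [pv_ofList_cons, List.filter_cons]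
      have hck : (!d.contains k) = true := by simp [hc']
      simp only [hck, if_true, List.filter_filter, List.map_cons]
      have hknotmem : k ∉ d.keys := fun hm =>
        absurd ((PySem.Dict.contains_iff_mem_keys d k).mpr hm) (by simp [hc'])
      rw [List.append_assoc]
      congr 1
      · -- d.items part
        apply List.map_congr_left
        intro q hq
        have hq1 : q.1 ≠ k := fun he => hknotmem (he ▸ PySem.Dict.mem_keys_of_mem_items d hq)
        have hkq : (k == q.1) = false := by simp [Ne.symm hq1]
        rw [pvGrp_cons]
        simp [hkq]
      · -- singleton + tail
        rw [List.singleton_append]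
        congr 1
        · -- head
          rw [pvGrp_cons]
          simp [List.append_assoc]
        · -- tail
          have hfilter : ((PySem.Set.ofList (r.map (fun p => p.1))).filter
                (fun y => !(d.insert k (pad ++ vs)).contains y))
              = ((PySem.Set.ofList (r.map (fun p => p.1))).filter
                (fun a => (!d.contains a && !(a == k)))) := by
            apply List.filter_congr
            intro y _
            rw [PySem.Dict.contains_insert]
            simp [Bool.not_or, Bool.and_comm]
          rw [hfilter]
          apply List.map_congr_left
          intro y hy
          have hyk : (y == k) = false := by
            have := (List.mem_filter.mp hy).2
            cases h1 : (y == k) <;> simp_all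
          have hky : (k == y) = false := by rw [pv_beq_comm]; exact hyk
          rw [pvGrp_cons]
          simp [hky]

lemma pv_pad_items (e2 ch : List String) (ks : List String)
    (d : PySem.Dict String (List String)) (hnd : d.keys.Nodup) (hks : ks.Nodup)
    (hsub : ∀ k ∈ ks, d.contains k = true) :
    (ks.foldl (fun d k => if ch.contains k then d else d.insert k (d.getD k [] ++ e2)) d).items
    = d.items.map (fun q =>
        if ks.contains q.1 && !ch.contains q.1 then (q.1, q.2 ++ e2) else q) := by
  induction ks generalizing d with
  | nil => simp
  | cons k t ih =>
    rw [List.foldl_cons]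
    have hkt : k ∉ t := (List.nodup_cons.mp hks).1
    have htn : t.Nodup := (List.nodup_cons.mp hks).2
    have hdk : d.contains k = true := hsub k (List.mem_cons_self)
    by_cases hch : ch.contains k = true
    · have hchm : k ∈ ch := by simpa using hch
      rw [if_pos hch, ih d hnd htn (fun j hj => hsub j (List.mem_cons_of_mem _ hj))]
      apply List.map_congr_left
      intro q hq
      by_cases hqk : q.1 = k
      · simp [hqk, hkt, hchm]
      · simp [hqk]
    · have hch' : ch.contains k = false := Bool.of_not_eq_true hch
      rw [if_neg hch]
      have hnd' := PySem.Dict.nodup_keys_insert d k (d.getD k [] ++ e2) hnd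
      have hsub' : ∀ j ∈ t, (d.insert k (d.getD k [] ++ e2)).contains j = true := by
        intro j hj
        rw [PySem.Dict.contains_insert]
        simp [hsub j (List.mem_cons_of_mem _ hj)]
      rw [ih _ hnd' htn hsub']
      rw [PySem.Dict.items_insert_of_contains d _ hdk, List.map_map]
      apply List.map_congr_left
      intro q hq
      by_cases hqk : (q.1 == k) = true
      · have hq1 : q.1 = k := eq_of_beq hqk
        have hval : d.getD k [] = q.2 := by
          have hm : (q.1, q.2) ∈ d.items := by simpa using hq
          rw [← hq1]; exact PySem.Dict.getD_of_mem_items d hm hnd []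
        have hchm : k ∉ ch := by simpa using hch'
        simp only [Function.comp_apply, hq1, hval]
        simp [hkt, hchm]
      · have hq1 : q.1 ≠ k := fun he => hqk (by simp [he])
        simp only [Function.comp_apply, if_neg hqk]
        simp [hq1]

lemma pv_main (l1 l2 : List (List String)) :
    change_two_list2d_to_one_list2d_with_samelen l1 l2
    = change_two_list2d_to_one_list2d_with_samelen_alt l1 l2 := by
  -- shared notation
  set e1 : List String := List.replicate ((l1.headD []).length - 1) "" with he1
  set e2 : List String := List.replicate ((l2.headD []).length - 1) "" with he2
  set r1 : List (String × List String) := pvRows l1 with hr1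
  set r2 : List (String × List String) := pvRows l2 with hr2
  set ks2 : List String := r2.map (fun p => p.1) with hks2
  set D1 : PySem.Dict String (List String) := r1.foldl (fun d p => d.insert p.1 p.2) PySem.Dict.empty with hD1
  have hndD1 : D1.keys.Nodup := by
    rw [hD1]
    exact PySem.Dict.nodup_keys_foldl_insert_key r1 (fun p => p.1) (fun _ p => p.2)
      PySem.Dict.empty (by simp [PySem.Dict.keys, PySem.Dict.empty])
  set N0 : List String := PySem.Set.ofList ks2 with hN0
  set N : List String := N0.filter (fun k => !D1.contains k) with hN
  -- dict2 of B
  set G2 : PySem.Dict String (List String) := r2.foldl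
    (fun d p => if d.contains p.1 then d.insert p.1 (d.getD p.1 [] ++ p.2)
      else d.insert p.1 ([] ++ p.2)) PySem.Dict.empty with hG2
  have hG2items : G2.items = N0.map (fun k => (k, pvGrp r2 k)) := by
    rw [hG2, pv_merge_items [] r2 PySem.Dict.empty (by simp [PySem.Dict.keys, PySem.Dict.empty])]
    have h1 : (PySem.Dict.empty : PySem.Dict String (List String)).items = [] := rfl
    rw [h1]
    have h2 : (PySem.Set.ofList (r2.map (fun p => p.1))).filter
        (fun k => !(PySem.Dict.empty : PySem.Dict String (List String)).contains k)
        = N0 := by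
      rw [hN0, hks2]
      apply List.filter_eq_self.mpr
      intro y _
      simp [PySem.Dict.contains_empty]
    rw [h2]
    simp
  have hkeysG2 : G2.keys = N0 := by
    have h0 : G2.keys = G2.items.map (fun p => p.1) := rfl
    rw [h0, hG2items, List.map_map]
    rw [show ((fun (p : String × List String) => p.1) ∘ fun k => (k, pvGrp r2 k)) = id from rfl,
      List.map_id]
  have hndG2 : G2.keys.Nodup := by
    rw [hkeysG2, hN0]
    exact PySem.Set.nodup_ofList ks2
  -- the merged dict of A after loop 2
  set M : PySem.Dict String (List String) := r2.foldl
    (fun d p => if d.contains p.1 then d.insert p.1 (d.getD p.1 [] ++ p.2)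
      else d.insert p.1 (e1 ++ p.2)) D1 with hM
  have hMitems : M.items = D1.items.map (fun q => (q.1, q.2 ++ pvGrp r2 q.1))
      ++ N.map (fun k => (k, e1 ++ pvGrp r2 k)) := by
    rw [hM, pv_merge_items e1 r2 D1 hndD1, hN, hN0, hks2]
  have hMkeys : M.keys = D1.keys ++ N := by
    have : M.keys = M.items.map (fun p => p.1) := rfl
    rw [this, hMitems, List.map_append, List.map_map, List.map_map]
    rw [show ((fun (p : String × List String) => p.1) ∘ fun (q : String × List String) =>
        (q.1, q.2 ++ pvGrp r2 q.1)) = (fun (q : String × List String) => q.1) from rfl,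
      show ((fun (p : String × List String) => p.1) ∘ fun k => (k, e1 ++ pvGrp r2 k)) = id from rfl,
      List.map_id]
    rfl
  have hNdisj : ∀ a ∈ D1.keys, a ∉ N := by
    intro a ha han
    have := (List.mem_filter.mp (hN ▸ han)).2
    have : D1.contains a = false := by cases hc : D1.contains a <;> simp_all
    exact absurd ((PySem.Dict.contains_iff_mem_keys D1 a).mpr ha) (by simp [this])
  have hndM : M.keys.Nodup := by
    rw [hMkeys]
    refine List.Nodup.append hndD1 (hN ▸ List.Nodup.filter _ (hN0 ▸ PySem.Set.nodup_ofList ks2)) ?_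
    intro a ha hb
    exact hNdisj a ha hb
  -- evaluate port A
  have hADict : pvADict l1 = D1 := by
    unfold pvADict
    rw [pvADict_rows, hD1, hr1]
  have hALoop2 : pvALoop2 e1 l2 (pvADict l1) = (M, ks2) := by
    unfold pvALoop2
    rw [pvALoop2_rows, hADict]
    have hsplit : (fun (p : PySem.Dict String (List String) × List String)
        (q : String × List String) =>
        if p.1.contains q.1 then (p.1.insert q.1 (p.1.getD q.1 [] ++ q.2), p.2 ++ [q.1])
        else (p.1.insert q.1 (e1 ++ q.2), p.2 ++ [q.1]))
      = (fun p q =>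
        ((if p.1.contains q.1 then p.1.insert q.1 (p.1.getD q.1 [] ++ q.2)
          else p.1.insert q.1 (e1 ++ q.2)),
         p.2 ++ [q.1])) := by
      funext p q
      by_cases h : p.1.contains q.1 = true <;> simp [h]
    rw [hsplit, PySem.List.foldl_prod_mk
      (f := fun (d : PySem.Dict String (List String)) (q : String × List String) =>
        if d.contains q.1 then d.insert q.1 (d.getD q.1 [] ++ q.2) else d.insert q.1 (e1 ++ q.2))
      (g := fun c (q : String × List String) => c ++ [q.1]), ← hr2]
    rw [hM, hks2,
      PySem.List.foldl_append_singleton_eq_map (fun (q : String × List String) => q.1) r2 [],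
      List.nil_append]
  have hA : change_two_list2d_to_one_list2d_with_samelen l1 l2
      = (M.items.map (fun q =>
          if M.keys.contains q.1 && !ks2.contains q.1 then (q.1, q.2 ++ e2) else q)).map
          (fun p => p.1 :: p.2) := by
    simp only [change_two_list2d_to_one_list2d_with_samelen]
    have hpe1 : pvAEmpty l1 = e1 := rfl
    have hpe2 : pvAEmpty l2 = e2 := rfl
    rw [hpe1, hpe2, hALoop2]
    have hloop3 : (pvALoop3 e2 (M, ks2).2 (M, ks2).1.keys (M, ks2).1).items
        = M.items.map (fun q =>
            if M.keys.contains q.1 && !ks2.contains q.1 then (q.1, q.2 ++ e2) else q) := by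
      unfold pvALoop3
      exact pv_pad_items e2 ks2 M.keys M hndM hndM
        (fun k hk => (PySem.Dict.contains_iff_mem_keys M k).mpr hk)
    rw [PySem.List.foldl_append_singleton_eq_map (fun (p : String × List String) => p.1 :: p.2) _ [],
      hloop3, List.nil_append]
  -- evaluate port B
  have hBDict1 : pvBDict1 l1 = D1 := by
    unfold pvBDict1
    rw [pvADict_rows, hD1, hr1]
  have hBDict2 : pvBDict2 l2 = G2 := by
    unfold pvBDict2
    rw [pvBDict2_rows, ← hr2, hG2]
    apply PySem.List.foldl_congr_mem
    intro acc p _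
    rw [PySem.Dict.modify]
    by_cases hc : acc.contains p.1 = true
    · rw [if_pos hc]
    · rw [if_neg hc, PySem.Dict.getD_of_not_contains acc [] (Bool.of_not_eq_true hc)]
  have hB : change_two_list2d_to_one_list2d_with_samelen_alt l1 l2
      = D1.items.map (fun q => q.1 :: (q.2 ++ (match G2.get? q.1 with
          | some v => v
          | none => e2)))
        ++ (G2.items.filter (fun p => !D1.contains p.1)).map (fun p => p.1 :: (e1 ++ p.2)) := by
    simp only [change_two_list2d_to_one_list2d_with_samelen_alt]
    rw [hBDict1, hBDict2]
    rw [PySem.List.foldl_append_singleton_eq_map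
      (fun (p : String × List String) => p.1 :: (p.2 ++ (match G2.get? p.1 with
        | some v => v
        | none => e2))) _ [], List.nil_append]
    have hflip : (fun (res : List (List String)) (p : String × List String) =>
        if D1.contains p.1 then res else res ++ [p.1 :: (e1 ++ p.2)])
      = (fun res p => if (!D1.contains p.1) then res ++ [p.1 :: (e1 ++ p.2)] else res) := by
      funext res p
      by_cases h : D1.contains p.1 = true <;> simp [h]
    rw [hflip, PySem.List.foldl_append_if (fun (p : String × List String) => !D1.contains p.1)
      (fun (p : String × List String) => p.1 :: (e1 ++ p.2)) G2.items _]
  -- assemble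
  rw [hA, hB, hMitems, List.map_append, List.map_append, List.map_map, List.map_map]
  congr 1
  · apply List.map_congr_left
    intro q hq
    have hqK : q.1 ∈ D1.keys := PySem.Dict.mem_keys_of_mem_items D1 hq
    have hqM : (M.keys.contains q.1) = true := by
      rw [hMkeys]
      simp only [List.contains_append, Bool.or_eq_true, List.contains_iff_mem]
      exact Or.inl hqK
    by_cases hmem : q.1 ∈ ks2
    · have hc2 : ks2.contains q.1 = true := by simpa using hmem
      have hget : G2.get? q.1 = some (pvGrp r2 q.1) := by
        apply PySem.Dict.get?_of_mem_items G2 _ hndG2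
        rw [hG2items]
        exact List.mem_map.mpr ⟨q.1,
          (by rw [hN0]; exact (PySem.Set.mem_ofList ks2 q.1).mpr hmem), rfl⟩
      simp [hget, hmem]
    · have hqMmem : q.1 ∈ M.keys := by rw [hMkeys]; exact List.mem_append_left _ hqK
      have hgrp : pvGrp r2 q.1 = [] := pvGrp_eq_nil r2 q.1 (hks2 ▸ hmem)
      have hget : G2.get? q.1 = none := by
        rw [PySem.Dict.get?_eq_none_iff_contains]
        cases hc : G2.contains q.1
        · rfl
        · exfalso
          have := (PySem.Dict.contains_iff_mem_keys G2 q.1).mp hc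
          rw [hkeysG2, hN0] at this
          exact hmem ((PySem.Set.mem_ofList ks2 q.1).mp this)
      simp [hget, hgrp, hqMmem, hmem]
  · rw [hG2items, List.filter_map,
      show ((fun (p : String × List String) => !D1.contains p.1) ∘ fun k => (k, pvGrp r2 k))
        = (fun k => !D1.contains k) from rfl, ← hN]
    simp only [List.map_map]
    apply List.map_congr_left
    intro y hy
    have hyN0 : y ∈ N0 := List.mem_of_mem_filter (hN ▸ hy)
    have hyks2 : y ∈ ks2 := (PySem.Set.mem_ofList ks2 y).mp (hN0 ▸ hyN0)
    simp [hyks2]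

-- ===== VERDICT (by name: the statement is the Claim_ definition above) =====
theorem change_two_list2d_to_one_list2d_with_samelen_spec : Claim_equal_change_two_list2d_to_one_list2d_with_samelen := by
  intro l1 l2 _ _
  unfold Spec_change_two_list2d_to_one_list2d_with_samelen
  exact pv_main l1 l2
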